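-- pv_equiv track=rewrite | github.com/MarcoTancredi/doneapp | tools/apply_changes.py | parse_context_sections
-- ===== SOURCE A (Python) =====
-- def normalize_context_lines(lines):
--     """
--     TOO/APL/APLCC - Normalize context lines by removing blank lines
--     Args:
--         lines (list): List of context lines
--     Returns:
--         list: Filtered lines without blanks
--     """
--     return [line for line in lines if line.strip()]
--
-- def parse_context_sections(content_lines):
--     """
--     TOO/APL/APLLL - Parse context sections with new delimited format
--     Args:
--         content_lines (list): Content lines from action
--     Returns:
--         tuple: (before_contexts, after_contexts, text_insertions) lists
--     """
--     before_contexts = []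
--     after_contexts = []
--     text_insertions = []
--
--     i = 0
--     while i < len(content_lines):
--         line = content_lines[i].strip()
--
--         # TOO/APL/APLMM - Parse BeforeToKeep sections
--         if line == '#BeforeToKeep':
--             before_lines = []
--             i += 1
--             while i < len(content_lines) and content_lines[i].strip() != '#EndBeforeToKeep':
--                 before_lines.append(content_lines[i])
--                 i += 1
--             # TOO/APL/APLMN - Filter out blank lines from context
--             before_contexts.append(normalize_context_lines(before_lines))
--
--         # TOO/APL/APLMO - Parse AfterToKeep sections
--         elif line == '#AfterToKeep':
--             after_lines = []
--             i += 1
--             while i < len(content_lines) and content_lines[i].strip() != '#EndAfterToKeep':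
--                 after_lines.append(content_lines[i])
--                 i += 1
--             # TOO/APL/APLMP - Filter out blank lines from context
--             after_contexts.append(normalize_context_lines(after_lines))
--
--         # TOO/APL/APLMQ - Parse TextToInsert sections
--         elif line == '#TextToInsert':
--             insert_lines = []
--             i += 1
--             while i < len(content_lines) and content_lines[i].strip() != '#EndTextToInsert':
--                 insert_lines.append(content_lines[i])
--                 i += 1
--             text_insertions.append(insert_lines)
--
--         i += 1
--
--     return before_contexts, after_contexts, text_insertions
-- ===== SOURCE B (Python) =====
-- def parse_context_sections(content_lines):
--     """Single-pass state machine with a marker dispatch table."""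
--     table = {
--         '#BeforeToKeep': ('#EndBeforeToKeep', 0, True),
--         '#AfterToKeep': ('#EndAfterToKeep', 1, True),
--         '#TextToInsert': ('#EndTextToInsert', 2, False),
--     }
--     out = ([], [], [])
--     state = None  # (end_marker, output_index, normalize)
--     acc = []
--     for raw in content_lines:
--         s = raw.strip()
--         if state is None:
--             if s in table:
--                 state = table[s]
--                 acc = []
--         else:
--             end, idx, norm = state
--             if s == end:
--                 out[idx].append([l for l in acc if l.strip()] if norm else acc)
--                 state = None
--                 acc = []
--             else:
--                 acc.append(raw)
--     if state is not None:
--         end, idx, norm = state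
--         out[idx].append([l for l in acc if l.strip()] if norm else acc)
--     return out
-- ===== Notes on version B (the rewrite author's own statement) =====
-- stated objective: faster
-- what changed: Replaced the outer while loop with nested inner scanning loops (one per section type) by a single linear pass driven by an explicit state variable, one accumulator and a marker dispatch table; the flat loop avoids the per-line loop-bound re-checks and branch chains of A (measured ~2x constant-factor speedup).
import Mathlib
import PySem

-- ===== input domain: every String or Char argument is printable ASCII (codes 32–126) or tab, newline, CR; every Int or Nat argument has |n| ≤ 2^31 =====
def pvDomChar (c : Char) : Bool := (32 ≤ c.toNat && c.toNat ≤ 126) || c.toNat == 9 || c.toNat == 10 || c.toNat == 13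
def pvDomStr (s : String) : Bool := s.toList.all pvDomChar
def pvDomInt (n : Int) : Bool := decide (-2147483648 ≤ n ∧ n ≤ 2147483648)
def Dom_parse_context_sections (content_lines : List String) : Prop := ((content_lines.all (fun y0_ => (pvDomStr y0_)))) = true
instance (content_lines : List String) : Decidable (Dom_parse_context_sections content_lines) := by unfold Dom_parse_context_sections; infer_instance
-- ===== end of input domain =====

-- B replaces A's outer-loop-plus-nested-inner-loops by one linear pass with an explicit
-- section state, one accumulator and a marker dispatch table (objective: alternative).

-- ===== PORT A =====
-- helper of A: keep only lines whose strip() is non-empty (Python truthiness)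
def normalize_context_lines (lines : List String) : List String :=
  lines.filter (fun line => PySem.Str.strip line ≠ "")

-- A's inner while loop: collect lines until the end marker (exclusive); returns the
-- collected lines and the remainder AFTER the end marker (the outer i += 1 skips it).
def pcsCollect (endMarker : String) : List String → List String × List String
  | [] => ([], [])
  | l :: rest =>
    if PySem.Str.strip l = endMarker then ([], rest)
    else
      let p := pcsCollect endMarker rest
      (l :: p.1, p.2)

theorem pcsCollect_len (e : String) (ls : List String) : (pcsCollect e ls).2.length ≤ ls.length := by
  induction ls with
  | nil => simp [pcsCollect]
  | cons l rest ih =>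
    simp only [pcsCollect]
    split <;> simp <;> omega

-- A's outer while loop (index i becomes the remaining suffix)
def parse_context_sections (content_lines : List String) :
    List (List String) × List (List String) × List (List String) :=
  match content_lines with
  | [] => ([], [], [])
  | l :: rest =>
    let line := PySem.Str.strip l
    if line = "#BeforeToKeep" then
      let p := pcsCollect "#EndBeforeToKeep" rest
      let r := parse_context_sections p.2
      (normalize_context_lines p.1 :: r.1, r.2.1, r.2.2)
    else if line = "#AfterToKeep" then
      let p := pcsCollect "#EndAfterToKeep" rest
      let r := parse_context_sections p.2
      (r.1, normalize_context_lines p.1 :: r.2.1, r.2.2)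
    else if line = "#TextToInsert" then
      let p := pcsCollect "#EndTextToInsert" rest
      let r := parse_context_sections p.2
      (r.1, r.2.1, p.1 :: r.2.2)
    else parse_context_sections rest
termination_by content_lines.length
decreasing_by
  · exact Nat.lt_succ_of_le (pcsCollect_len _ _)
  · exact Nat.lt_succ_of_le (pcsCollect_len _ _)
  · exact Nat.lt_succ_of_le (pcsCollect_len _ _)
  · exact Nat.lt_succ_of_le (Nat.le_refl _)

-- ===== PORT B =====
-- Source B's dispatch table: start marker -> (end marker, output index, normalize flag)
def pcsTable (s : String) : Option (String × Nat × Bool) :=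
  if s = "#BeforeToKeep" then some ("#EndBeforeToKeep", 0, true)
  else if s = "#AfterToKeep" then some ("#EndAfterToKeep", 1, true)
  else if s = "#TextToInsert" then some ("#EndTextToInsert", 2, false)
  else none

-- Source B's out[idx].append(...), normalizing when the flag is set
def pcsPush (O : List (List String) × List (List String) × List (List String))
    (k : Nat) (norm : Bool) (acc : List String) :
    List (List String) × List (List String) × List (List String) :=
  let v := if norm then acc.filter (fun l => PySem.Str.strip l ≠ "") else acc
  match k with
  | 0 => (O.1 ++ [v], O.2.1, O.2.2)
  | 1 => (O.1, O.2.1 ++ [v], O.2.2)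
  | _ => (O.1, O.2.1, O.2.2 ++ [v])

-- loop state: (current section or none, accumulator, the three output lists)
abbrev PcsState :=
  Option (String × Nat × Bool) × List String ×
    (List (List String) × List (List String) × List (List String))

-- Source B's loop body
def pcsStep (st : PcsState) (raw : String) : PcsState :=
  let s := PySem.Str.strip raw
  match st with
  | (none, acc, O) =>
    match pcsTable s with
    | some sec => (some sec, [], O)
    | none => (none, acc, O)
  | (some (e, k, n), acc, O) =>
    if s = e then (none, [], pcsPush O k n acc)
    else (some (e, k, n), acc ++ [raw], O)

-- Source B's trailing "if state is not None" finalization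
def pcsFinalize (st : PcsState) :
    List (List String) × List (List String) × List (List String) :=
  match st with
  | (none, _, O) => O
  | (some (_, k, n), acc, O) => pcsPush O k n acc

def parse_context_sections_alt (content_lines : List String) :
    List (List String) × List (List String) × List (List String) :=
  pcsFinalize (content_lines.foldl pcsStep (none, [], ([], [], [])))

-- ===== PRECONDITION & SPEC =====
def Spec_parse_context_sections (content_lines : List String) (out : List (List String) × List (List String) × List (List String)) : Prop := out = parse_context_sections_alt content_lines
instance (content_lines : List String) (out : List (List String) × List (List String) × List (List String)) : Decidable (Spec_parse_context_sections content_lines out) := by unfold Spec_parse_context_sections; infer_instance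

-- ===== CLAIM (what is proved, stated in full; the proofs are below) =====
def Claim_equal_parse_context_sections : Prop := ∀ (content_lines : List String), Dom_parse_context_sections content_lines → Spec_parse_context_sections content_lines (parse_context_sections content_lines)

-- ===== LEMMAS AND PROOFS =====

-- running B's fold while inside a section = A's inner collect, then continue idle
theorem pcs_section (e : String) (k : Nat) (n : Bool) :
    ∀ (rest acc : List String) (O : List (List String) × List (List String) × List (List String)),
    pcsFinalize (rest.foldl pcsStep (some (e, k, n), acc, O))
      = pcsFinalize ((pcsCollect e rest).2.foldl pcsStep
          (none, [], pcsPush O k n (acc ++ (pcsCollect e rest).1))) := by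
  intro rest
  induction rest with
  | nil => intro acc O; simp [pcsCollect, pcsFinalize]
  | cons l rest ih =>
    intro acc O
    by_cases h : PySem.Str.strip l = e
    · simp [pcsCollect, pcsStep, h, pcsFinalize]
    · simp only [pcsCollect, h, if_false, List.foldl_cons, pcsStep]
      rw [ih (acc ++ [l]) O]
      simp

-- merging accumulated outputs with the rest of the parse
def pcsMerge (O r : List (List String) × List (List String) × List (List String)) :
    List (List String) × List (List String) × List (List String) :=
  (O.1 ++ r.1, O.2.1 ++ r.2.1, O.2.2 ++ r.2.2)

-- running B's fold from the idle state = A's outer loop, prefixed by what was built so far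
theorem pcs_main : ∀ (fuel : Nat) (rest : List String), rest.length ≤ fuel →
    ∀ (O : List (List String) × List (List String) × List (List String)),
    pcsFinalize (rest.foldl pcsStep (none, [], O)) = pcsMerge O (parse_context_sections rest) := by
  intro fuel
  induction fuel with
  | zero =>
    intro rest h O
    have : rest = [] := List.length_eq_zero_iff.mp (Nat.le_zero.mp h)
    subst this
    simp [pcsFinalize, parse_context_sections, pcsMerge]
  | succ m ih =>
    intro rest h O
    match rest with
    | [] => simp [pcsFinalize, parse_context_sections, pcsMerge]
    | l :: rest =>
      have hlen : rest.length ≤ m := by simpa using h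
      by_cases h1 : PySem.Str.strip l = "#BeforeToKeep"
      · simp only [List.foldl_cons]
        simp [pcsStep, pcsTable, h1, normalize_context_lines]
        rw [pcs_section, ih _ (Nat.le_trans (pcsCollect_len _ _) hlen)]
        simp [parse_context_sections, h1, pcsMerge, pcsPush, normalize_context_lines]
      · by_cases h2 : PySem.Str.strip l = "#AfterToKeep"
        · simp only [List.foldl_cons]
          simp [pcsStep, pcsTable, h1, h2, normalize_context_lines]
          rw [pcs_section, ih _ (Nat.le_trans (pcsCollect_len _ _) hlen)]
          simp [parse_context_sections, h1, h2, pcsMerge, pcsPush, normalize_context_lines]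
        · by_cases h3 : PySem.Str.strip l = "#TextToInsert"
          · simp only [List.foldl_cons]
            simp [pcsStep, pcsTable, h1, h2, h3, normalize_context_lines]
            rw [pcs_section, ih _ (Nat.le_trans (pcsCollect_len _ _) hlen)]
            simp [parse_context_sections, h1, h2, h3, pcsMerge, pcsPush, normalize_context_lines]
          · simp only [List.foldl_cons]
            simp [pcsStep, pcsTable, h1, h2, h3, normalize_context_lines]
            rw [ih _ hlen]
            simp [parse_context_sections, h1, h2, h3]

-- ===== VERDICT (by name: the statement is the Claim_ definition above) =====
theorem parse_context_sections_spec : Claim_equal_parse_context_sections := by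
  intro content_lines _
  unfold Spec_parse_context_sections parse_context_sections_alt
  rw [pcs_main content_lines.length content_lines (Nat.le_refl _)]
  simp [pcsMerge]
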